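-- pv_equiv track=rewrite | github.com/gyfpython/start_python | practice/get_best_work.py | best_worker
-- ===== SOURCE A (Python) =====
-- def best_worker(numbers: list):
--     if not numbers:
--         return None
--     best_work = numbers[0]
--     for i in range(len(numbers)):
--         temp_numbers = numbers[i:]
--         temp_best = temp_numbers[0]
--         for j in range(1, len(temp_numbers)):
--             temp_best = temp_best + temp_numbers[j]
--             if best_work >= temp_best:
--                 best_work = temp_best
--     return best_work
-- ===== SOURCE B (Python) =====
-- def best_worker(numbers: list):
--     # Kadane-style single-pass scan: m1 = minimal subarray sum ending at the current element
--     if not numbers: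
--         return None
--     best = numbers[0]
--     m1 = numbers[0]
--     for x in numbers[1:]:
--         cand = m1 + x          # minimal subarray sum of length at least two ending here
--         best = min(best, cand)
--         m1 = min(cand, x)
--     return best
-- ===== Notes on version B (the rewrite author's own statement) =====
-- stated objective: faster
-- what changed: Replaced the nested suffix/prefix-sum scan with a single-pass Kadane-style minimum-subarray (length >= 2) DP combined with the first element.
import Mathlib
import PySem

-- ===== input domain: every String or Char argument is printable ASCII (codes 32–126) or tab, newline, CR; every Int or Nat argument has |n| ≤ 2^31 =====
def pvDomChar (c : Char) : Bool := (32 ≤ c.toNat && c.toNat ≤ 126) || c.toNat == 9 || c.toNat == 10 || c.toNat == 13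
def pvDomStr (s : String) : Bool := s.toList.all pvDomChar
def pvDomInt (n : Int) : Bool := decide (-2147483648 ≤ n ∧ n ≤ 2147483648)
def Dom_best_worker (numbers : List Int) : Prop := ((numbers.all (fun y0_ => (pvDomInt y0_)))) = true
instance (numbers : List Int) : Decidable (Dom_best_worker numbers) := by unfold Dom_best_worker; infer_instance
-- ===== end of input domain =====

-- B replaces A's quadratic nested suffix scan by a one-pass Kadane-style minimum-subarray DP (objective: faster).

-- ===== PORT A =====
-- literal transliteration of A: outer loop over range(len(numbers)) taking suffix slices,
-- inner loop accumulating prefix sums of the suffix and updating best_work on >=.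
-- pyGetD's default is never consulted: every index the loops produce is in range.
def best_worker (numbers : List Int) : Option Int :=
  match numbers with
  | [] => none
  | n0 :: _ =>
    some ((PySem.List.pyRange 0 (numbers.length : Int) 1).foldl (fun best_work i =>
      let temp_numbers := PySem.List.slice numbers (some i) none
      let temp_best := PySem.List.pyGetD temp_numbers 0 0
      ((PySem.List.pyRange 1 (temp_numbers.length : Int) 1).foldl
        (fun (s : Int × Int) j =>
          let tb := s.1 + PySem.List.pyGetD temp_numbers j 0
          (tb, if s.2 ≥ tb then tb else s.2))
        (temp_best, best_work)).2) n0)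

-- ===== PORT B =====
-- literal transliteration of Source B: state (m1, best), one fold over numbers[1:].
def best_worker_alt (numbers : List Int) : Option Int :=
  match numbers with
  | [] => none
  | n0 :: rest =>
    some ((rest.foldl (fun (s : Int × Int) x =>
      let cand := s.1 + x
      (min cand x, min s.2 cand)) (n0, n0)).2)

-- ===== PRECONDITION & SPEC =====
def Spec_best_worker (numbers : List Int) (out : Option Int) : Prop := out = best_worker_alt numbers
instance (numbers : List Int) (out : Option Int) : Decidable (Spec_best_worker numbers out) := by unfold Spec_best_worker; infer_instance

-- ===== CLAIM (what is proved, stated in full; the proofs are below) =====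
def Claim_equal_best_worker : Prop := ∀ (numbers : List Int), Dom_best_worker numbers → Spec_best_worker numbers (best_worker numbers)

-- ===== LEMMAS AND PROOFS =====

-- partial sums a + r0, a + r0 + r1, … : A's inner-loop candidates started from a
def pvPsums (a : Int) : List Int → List Int
  | [] => []
  | y :: r => (a + y) :: pvPsums (a + y) r

-- all length-≥2 subarray sums, grouped by start position (A's enumeration order)
def pvCands2 : List Int → List Int
  | [] => []
  | x :: r => pvPsums x r ++ pvCands2 r

-- A's outer loop, structurally: fold f over every suffix
def pvSuffFold (f : List Int → Int → Int) (bw : Int) : List Int → Int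
  | [] => bw
  | x :: r => pvSuffFold f (f (x :: r) bw) r

-- the inner-loop body of A's port as a function of the suffix (defeq to the port's let-form)
def pvInner (t : List Int) (bw : Int) : Int :=
  ((PySem.List.pyRange 1 (t.length : Int) 1).foldl
    (fun (s : Int × Int) j =>
      (s.1 + PySem.List.pyGetD t j 0,
        if s.2 ≥ s.1 + PySem.List.pyGetD t j 0 then s.1 + PySem.List.pyGetD t j 0 else s.2))
    (PySem.List.pyGetD t 0 0, bw)).2

theorem pv_if_ge_min (a b : Int) : (if a ≥ b then b else a) = min a b := by
  split_ifs <;> omega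

theorem pv_pairfold (tr : List Int) : ∀ (a bw : Int),
    tr.foldl (fun (s : Int × Int) x => ((s.1 + x), if s.2 ≥ s.1 + x then s.1 + x else s.2)) (a, bw)
      = (a + tr.sum, List.foldl min bw (pvPsums a tr)) := by
  induction tr with
  | nil => intro a bw; simp [pvPsums]
  | cons y r ih =>
    intro a bw
    simp only [List.foldl_cons]
    rw [ih (a + y)]
    simp only [pvPsums, List.sum_cons, pv_if_ge_min, List.foldl_cons, add_assoc]

theorem pv_inner_char (t0 : Int) (tr : List Int) (bw : Int) :
    pvInner (t0 :: tr) bw = List.foldl min bw (pvPsums t0 tr) := by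
  unfold pvInner
  rw [PySem.List.foldl_pyRange_pyGetD' (t0 :: tr) 0
        (fun (s : Int × Int) v => ((s.1 + v), if s.2 ≥ s.1 + v then s.1 + v else s.2))
        (PySem.List.pyGetD (t0 :: tr) 0 0, bw) (by omega : (0:Int) ≤ 1)]
  simp [PySem.List.pyGetD_zero_cons, pv_pairfold]

-- an index loop over all suffixes is the structural fold over suffixes
theorem pv_foldl_range_drop (f : List Int → Int → Int) :
    ∀ (L : List Int) (bw : Int),
      (List.range L.length).foldl (fun acc k => f (L.drop k) acc) bw = pvSuffFold f bw L := by
  intro L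
  induction L with
  | nil => intro bw; simp [pvSuffFold]
  | cons x r ih =>
    intro bw
    rw [List.length_cons, List.range_succ_eq_map]
    simp only [List.foldl_cons, List.foldl_map, List.drop_zero, List.drop_succ_cons]
    exact ih (f (x :: r) bw)

theorem pv_outer_char (L : List Int) (bw : Int) :
    (PySem.List.pyRange 0 (L.length : Int) 1).foldl
        (fun acc i => pvInner (PySem.List.slice L (some i) none) acc) bw
      = pvSuffFold pvInner bw L := by
  rw [PySem.List.pyRange_one]
  simp only [sub_zero, Int.toNat_natCast, List.foldl_map, zero_add,
    PySem.List.slice_from_natCast]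
  exact pv_foldl_range_drop pvInner L bw

theorem pv_suffFold_cands2 : ∀ (L : List Int) (bw : Int),
    pvSuffFold pvInner bw L = List.foldl min bw (pvCands2 L) := by
  intro L
  induction L with
  | nil => intro bw; simp [pvSuffFold, pvCands2]
  | cons x r ih =>
    intro bw
    simp only [pvSuffFold, pvCands2, pv_inner_char, ih, List.foldl_append]

theorem pv_fmin_pull : ∀ (l : List Int) (c a : Int),
    List.foldl min (min c a) l = min (List.foldl min c l) a := by
  intro l
  induction l with
  | nil => intro c a; rfl
  | cons x l ih =>
    intro c a
    simp only [List.foldl_cons]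
    rw [min_right_comm c a x, ih]

theorem pv_psums_zip : ∀ (r : List Int) (a b : Int),
    pvPsums (min a b) r = List.zipWith min (pvPsums a r) (pvPsums b r) := by
  intro r
  induction r with
  | nil => intro a b; rfl
  | cons y r ih =>
    intro a b
    simp only [pvPsums, List.zipWith_cons_cons]
    rw [← min_add_add_right, ih]

theorem pv_psums_length (r : List Int) : ∀ (a : Int), (pvPsums a r).length = r.length := by
  induction r with
  | nil => intro a; rfl
  | cons y r ih => intro a; simp [pvPsums, ih]

theorem pv_fmin_zip : ∀ (l1 l2 : List Int) (c : Int), l1.length = l2.length →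
    List.foldl min c (List.zipWith min l1 l2)
      = List.foldl min (List.foldl min c l1) l2 := by
  intro l1
  induction l1 with
  | nil =>
    intro l2 c h
    cases l2 with
    | nil => rfl
    | cons y l2 => simp at h
  | cons x l1 ih =>
    intro l2 c h
    cases l2 with
    | nil => simp at h
    | cons y l2 =>
      simp only [List.zipWith_cons_cons, List.foldl_cons]
      rw [← min_assoc c x y, ih l2 _ (by simpa using h), pv_fmin_pull l1 (min c x) y]

theorem pv_bfold_char : ∀ (rest : List Int) (m1 bw : Int),
    (rest.foldl (fun (s : Int × Int) x => (min (s.1 + x) x, min s.2 (s.1 + x))) (m1, bw)).2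
      = List.foldl min bw (pvPsums m1 rest ++ pvCands2 rest) := by
  intro rest
  induction rest with
  | nil => intro m1 bw; simp [pvPsums, pvCands2]
  | cons x r ih =>
    intro m1 bw
    rw [List.foldl_cons, ih]
    show List.foldl min (min bw (m1 + x)) (pvPsums (min (m1 + x) x) r ++ pvCands2 r)
      = List.foldl min bw (pvPsums m1 (x :: r) ++ pvCands2 (x :: r))
    calc List.foldl min (min bw (m1 + x)) (pvPsums (min (m1 + x) x) r ++ pvCands2 r)
        = List.foldl min (List.foldl min (min bw (m1 + x)) (pvPsums (min (m1 + x) x) r)) (pvCands2 r) := by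
          rw [List.foldl_append]
      _ = List.foldl min (List.foldl min (List.foldl min (min bw (m1 + x)) (pvPsums (m1 + x) r)) (pvPsums x r)) (pvCands2 r) := by
          rw [pv_psums_zip, pv_fmin_zip _ _ _ (by rw [pv_psums_length, pv_psums_length])]
      _ = List.foldl min bw (pvPsums m1 (x :: r) ++ pvCands2 (x :: r)) := by
          show _ = List.foldl min bw (((m1 + x) :: pvPsums (m1 + x) r) ++ (pvPsums x r ++ pvCands2 r))
          simp only [List.cons_append, List.foldl_cons, List.foldl_append]

-- ===== VERDICT (by name: the statement is the Claim_ definition above) =====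
theorem best_worker_spec : Claim_equal_best_worker := by
  intro numbers _
  unfold Spec_best_worker
  match numbers with
  | [] => rfl
  | n0 :: rest =>
    have hA : best_worker (n0 :: rest)
        = some ((PySem.List.pyRange 0 (((n0 :: rest)).length : Int) 1).foldl
            (fun acc i => pvInner (PySem.List.slice (n0 :: rest) (some i) none) acc) n0) := rfl
    have hB : best_worker_alt (n0 :: rest)
        = some ((rest.foldl (fun (s : Int × Int) x =>
            (min (s.1 + x) x, min s.2 (s.1 + x))) (n0, n0)).2) := rfl
    rw [hA, hB, pv_outer_char, pv_suffFold_cands2, pv_bfold_char]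
    rfl
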